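-- pv_equiv track=rewrite | github.com/Anduqq/padelAI | backend/app/services/analytics.py | _streaks_from_results
-- ===== SOURCE A (Python) =====
-- def _streaks_from_results(results: list[str]) -> dict:
--     current_win_streak = 0
--     for result in reversed(results):
--         if result != "W":
--             break
--         current_win_streak += 1
--
--     current_unbeaten_streak = 0
--     for result in reversed(results):
--         if result == "L":
--             break
--         current_unbeaten_streak += 1
--
--     best_win_streak = 0
--     running_win_streak = 0
--     for result in results:
--         if result == "W":
--             running_win_streak += 1
--             best_win_streak = max(best_win_streak, running_win_streak)
--         else:
--             running_win_streak = 0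
--
--     return {
--         "current_win_streak": current_win_streak,
--         "current_unbeaten_streak": current_unbeaten_streak,
--         "best_win_streak": best_win_streak,
--     }
-- ===== SOURCE B (Python) =====
-- def _streaks_from_results(results: list[str]) -> dict:
--     run_win = 0
--     run_unbeaten = 0
--     best_win = 0
--     for result in results:
--         if result == "W":
--             run_win += 1
--             best_win = max(best_win, run_win)
--         else:
--             run_win = 0
--         if result == "L":
--             run_unbeaten = 0
--         else:
--             run_unbeaten += 1
--     return {
--         "current_win_streak": run_win,
--         "current_unbeaten_streak": run_unbeaten,
--         "best_win_streak": best_win,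
--     }
-- ===== Notes on version B (the rewrite author's own statement) =====
-- stated objective: simpler
-- what changed: Replaces A's three separate loops (two reversed break-loops plus a forward best-streak loop) by one forward pass maintaining three reset-accumulators whose terminal values equal the trailing counts.
import Mathlib
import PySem

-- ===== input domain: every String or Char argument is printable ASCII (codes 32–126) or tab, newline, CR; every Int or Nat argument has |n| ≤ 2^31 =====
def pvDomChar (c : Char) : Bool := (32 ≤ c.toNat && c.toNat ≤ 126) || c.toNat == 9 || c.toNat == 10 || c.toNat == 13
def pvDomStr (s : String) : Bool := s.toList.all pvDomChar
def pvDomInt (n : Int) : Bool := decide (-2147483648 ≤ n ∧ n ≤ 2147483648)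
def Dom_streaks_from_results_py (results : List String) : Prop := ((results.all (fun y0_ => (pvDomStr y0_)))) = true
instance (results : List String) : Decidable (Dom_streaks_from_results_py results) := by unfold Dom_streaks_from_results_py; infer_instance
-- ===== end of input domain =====

-- B replaces A's three separate loops by one forward pass with three reset-accumulators (objective: simpler); same O(n) cost, proved to return the same dict.

-- ===== PORT A =====
-- Port of A: two break-loops over the reversed list (counting until break) and a forward fold.
def pvCW (l : List String) : Int :=
  match l with
  | [] => 0
  | r :: rest => if r ≠ "W" then 0 else pvCW rest + 1

def pvCU (l : List String) : Int :=
  match l with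
  | [] => 0
  | r :: rest => if r = "L" then 0 else pvCU rest + 1

def pvBestStep (s : Int × Int) (r : String) : Int × Int :=
  if r = "W" then (max s.1 (s.2 + 1), s.2 + 1) else (s.1, 0)

def streaks_from_results_py (results : List String) : List (String × Int) :=
  let cw := pvCW results.reverse
  let cu := pvCU results.reverse
  let bs := results.foldl pvBestStep (0, 0)
  [("current_win_streak", cw), ("current_unbeaten_streak", cu), ("best_win_streak", bs.1)]

-- ===== PORT B =====
-- B: ONE forward pass with three reset-accumulators (run_win, run_unbeaten, best_win).
def pvStepB (s : Int × Int × Int) (r : String) : Int × Int × Int :=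
  let rw := if r = "W" then s.1 + 1 else 0
  let bw := if r = "W" then max s.2.2 (s.1 + 1) else s.2.2
  let ru := if r = "L" then 0 else s.2.1 + 1
  (rw, ru, bw)

def streaks_from_results_py_alt (results : List String) : List (String × Int) :=
  let s := results.foldl pvStepB (0, 0, 0)
  [("current_win_streak", s.1), ("current_unbeaten_streak", s.2.1), ("best_win_streak", s.2.2)]

-- ===== PRECONDITION & SPEC =====
def Spec_streaks_from_results_py (results : List String) (out : List (String × Int)) : Prop := out = streaks_from_results_py_alt results
instance (results : List String) (out : List (String × Int)) : Decidable (Spec_streaks_from_results_py results out) := by unfold Spec_streaks_from_results_py; infer_instance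

-- ===== CLAIM (what is proved, stated in full; the proofs are below) =====
def Claim_equal_streaks_from_results_py : Prop := ∀ (results : List String), Dom_streaks_from_results_py results → Spec_streaks_from_results_py results (streaks_from_results_py results)

-- ===== LEMMAS AND PROOFS =====

-- ===== VERDICT (by name: the statement is the Claim_ definition above) =====
-- The single forward pass's terminal state equals A's three results: the running-win
-- accumulator ends at the trailing-W count, the unbeaten one at the trailing-non-L count,
-- and the best component tracks A's forward best fold (whose running part is the same).
theorem pvKey (l : List String) :
    l.foldl pvStepB (0, 0, 0)
      = (pvCW l.reverse, pvCU l.reverse, (l.foldl pvBestStep (0, 0)).1)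
    ∧ (l.foldl pvBestStep (0, 0)).2 = pvCW l.reverse := by
  induction l using List.reverseRecOn with
  | nil => simp [pvCW, pvCU]
  | append_singleton l a ih =>
    obtain ⟨h1, h2⟩ := ih
    simp only [List.foldl_append, List.foldl_cons, List.foldl_nil, h1,
      List.reverse_append, List.reverse_singleton, List.singleton_append]
    by_cases hw : a = "W"
    · simp [pvStepB, pvCW, pvCU, pvBestStep, hw, h2]
    · by_cases hl : a = "L" <;> simp [pvStepB, pvCW, pvCU, pvBestStep, hw, hl]

theorem streaks_from_results_py_spec : Claim_equal_streaks_from_results_py := by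
  intro results _
  unfold Spec_streaks_from_results_py streaks_from_results_py streaks_from_results_py_alt
  simp [(pvKey results).1]
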